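-- pv_equiv track=rewrite | github.com/teichholz/aoc | aoc-py/2019/day04.py | two_same2
-- ===== SOURCE A (Python) =====
-- def two_same2(p: str):
--     seen = set()
--     for i, c in enumerate(p[:-1]):
--         found = c == p[i + 1]
--         if c not in seen and found:
--             longer_than_two = i + 2 < len(p) and c == p[i + 2]
--             if not longer_than_two:
--                 return True
--         seen.add(c)
--
--     return False
-- ===== SOURCE B (Python) =====
-- from itertools import groupby
--
-- def two_same2(p: str):
--     seen = set()
--     for c, g in groupby(p):
--         if c not in seen and sum(1 for _ in g) == 2:
--             return True
--         seen.add(c)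
--     return False
-- ===== Notes on version B (the rewrite author's own statement) =====
-- stated objective: idiomatic
-- what changed: B replaces A's index-based lookahead scan (p[i+1]/p[i+2] with a seen-set guard) by an itertools.groupby pass over maximal runs, returning True when a character's first run has length exactly 2.
import Mathlib
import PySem

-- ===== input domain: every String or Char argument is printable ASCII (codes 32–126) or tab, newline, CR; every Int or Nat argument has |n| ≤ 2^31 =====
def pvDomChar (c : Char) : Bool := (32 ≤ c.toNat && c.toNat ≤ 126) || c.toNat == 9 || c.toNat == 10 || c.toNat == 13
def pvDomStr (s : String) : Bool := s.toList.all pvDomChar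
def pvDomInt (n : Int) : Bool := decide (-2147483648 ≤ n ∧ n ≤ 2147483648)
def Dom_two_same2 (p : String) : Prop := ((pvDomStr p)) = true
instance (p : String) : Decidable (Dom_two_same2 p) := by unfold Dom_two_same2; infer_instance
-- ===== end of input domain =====

-- B is the same task written the idiomatic way: a groupby-style pass over maximal runs
-- instead of A's index-based lookahead scan; return value equivalence only (no mutation).

-- ===== PORT A =====
-- A's loop: for i, c in enumerate(p[:-1]) with lookups p[i+1], p[i+2].  We recurse on the
-- character list: at position i the list is c :: d :: rest with d = p[i+1] and
-- rest.head? = p[i+2] (none exactly when i+2 = len p, i.e. 'i + 2 < len(p)' is False);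
-- the loop ends when fewer than two characters remain (i reaches len(p[:-1])).  Exact.
def twoSame2Loop : List Char → PySem.Set Char → Bool
  | c :: d :: rest, seen =>
      if ¬ seen.contains c = true ∧ c = d then
        -- longer_than_two = i + 2 < len(p) and c == p[i + 2]
        if rest.head? = some c then twoSame2Loop (d :: rest) (seen.add c)
        else true
      else twoSame2Loop (d :: rest) (seen.add c)
  | _, _ => false

def two_same2 (p : String) : Bool := twoSame2Loop p.toList PySem.Set.empty

-- ===== PORT B =====
-- groupby(p): the maximal consecutive runs of p, in order, as (char, length) pairs.
def pvRuns : List Char → List (Char × Nat)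
  | [] => []
  | c :: rest =>
      match pvRuns rest with
      | (d, k) :: t => if c = d then (c, k + 1) :: t else (c, 1) :: (d, k) :: t
      | [] => [(c, 1)]

-- for c, g in groupby(p): if c not in seen and len == 2: return True; seen.add(c)
def twoSame2AltLoop : List (Char × Nat) → PySem.Set Char → Bool
  | [], _ => false
  | (c, k) :: rest, seen =>
      if ¬ seen.contains c = true ∧ k = 2 then true
      else twoSame2AltLoop rest (seen.add c)

def two_same2_alt (p : String) : Bool := twoSame2AltLoop (pvRuns p.toList) PySem.Set.empty

-- ===== PRECONDITION & SPEC =====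
def Spec_two_same2 (p : String) (out : Bool) : Prop := out = two_same2_alt p
instance (p : String) (out : Bool) : Decidable (Spec_two_same2 p out) := by unfold Spec_two_same2; infer_instance

-- ===== CLAIM (what is proved, stated in full; the proofs are below) =====
def Claim_equal_two_same2 : Prop := ∀ (p : String), Dom_two_same2 p → Spec_two_same2 p (two_same2 p)

-- ===== LEMMAS AND PROOFS =====

theorem pvRuns_cons (c : Char) (rest : List Char) :
    pvRuns (c :: rest) =
      match pvRuns rest with
      | (d, k) :: t => if c = d then (c, k + 1) :: t else (c, 1) :: (d, k) :: t
      | [] => [(c, 1)] := rfl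

theorem pvRuns_shape (c : Char) (t : List Char) :
    ∃ k t', pvRuns (c :: t) = (c, k) :: t' ∧ 1 ≤ k ∧ (t.head? = some c → 2 ≤ k) := by
  induction t generalizing c with
  | nil => exact ⟨1, [], rfl, le_refl _, by simp⟩
  | cons d t2 ih =>
      obtain ⟨k, t', hr, hk, _⟩ := ih d
      by_cases h : c = d
      · subst h
        exact ⟨k + 1, t', by rw [pvRuns_cons, hr]; simp, by omega, fun _ => by omega⟩
      · refine ⟨1, (d, k) :: t', ?_, le_refl _, ?_⟩
        · rw [pvRuns_cons, hr]; simp [h]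
        · intro hh; simp at hh; exact absurd hh.symm h

theorem mem_add_self (s : PySem.Set Char) (c : Char) : c ∈ s.add c :=
  (PySem.Set.mem_add _ _ _).mpr (Or.inr rfl)

theorem set_add_add (s : PySem.Set Char) (c : Char) :
    (s.add c).add c = s.add c :=
  PySem.Set.add_of_mem (mem_add_self s c)

theorem altLoop_skip (c : Char) (k : Nat) (rest : List (Char × Nat))
    (seen : PySem.Set Char) (h : c ∈ seen) :
    twoSame2AltLoop ((c, k) :: rest) seen = twoSame2AltLoop rest (seen.add c) := by
  rw [twoSame2AltLoop, if_neg (fun hc => hc.1 ((PySem.Set.contains_iff _ _).mpr h))]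

theorem altLoop_miss (c : Char) (k : Nat) (rest : List (Char × Nat))
    (seen : PySem.Set Char) (h : ¬ k = 2) :
    twoSame2AltLoop ((c, k) :: rest) seen = twoSame2AltLoop rest (seen.add c) := by
  rw [twoSame2AltLoop, if_neg]
  simp [h]

theorem altLoop_hit (c : Char) (k : Nat) (rest : List (Char × Nat))
    (seen : PySem.Set Char) (h1 : ¬ seen.contains c = true) (h2 : k = 2) :
    twoSame2AltLoop ((c, k) :: rest) seen = true := by
  rw [twoSame2AltLoop, if_pos ⟨h1, h2⟩]

theorem loops_agree (l : List Char) (seen : PySem.Set Char) :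
    twoSame2Loop l seen = twoSame2AltLoop (pvRuns l) seen := by
  induction l generalizing seen with
  | nil => simp [twoSame2Loop, pvRuns, twoSame2AltLoop]
  | cons c rest ih =>
      match rest, ih with
      | [], _ =>
          simp [twoSame2Loop, pvRuns, twoSame2AltLoop]
      | d :: t, ih =>
          by_cases hcd : c = d
          · subst hcd
            obtain ⟨k, t', hr, hk1, hk2⟩ := pvRuns_shape c t
            have hr2 : pvRuns (c :: c :: t) = (c, k + 1) :: t' := by
              rw [pvRuns_cons, hr]; simp
            have hmem : c ∈ (seen.add c) := mem_add_self seen c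
            by_cases hseen : seen.contains c = true
            · -- c already seen: both sides skip this run
              have hm : c ∈ seen := (PySem.Set.contains_iff _ _).mp hseen
              rw [twoSame2Loop, if_neg (by simp [hm]), ih, hr,
                  altLoop_skip c k t' (seen.add c) hmem, set_add_add,
                  hr2, altLoop_skip c (k + 1) t' seen hm]
            · by_cases hhead : t.head? = some c
              · -- run length ≥ 3: A skips via longer_than_two, B sees k+1 ≥ 3
                have hk3 : ¬ (k + 1 = 2) := by have := hk2 hhead; omega
                rw [twoSame2Loop, if_pos ⟨hseen, rfl⟩, if_pos hhead,
                    ih, hr, altLoop_skip c k t' (seen.add c) hmem, set_add_add,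
                    hr2, altLoop_miss c (k + 1) t' seen hk3]
              · -- run length exactly 2: both return True
                have hk1' : k = 1 := by
                  rcases t with _ | ⟨e, t2⟩
                  · have := congrArg (fun l => l.head?) hr
                    simp [pvRuns] at this; omega
                  · have hec : ¬ (c = e) := fun h => hhead (by simp [h])
                    obtain ⟨k2, t2', hr3, _, _⟩ := pvRuns_shape e t2
                    rw [pvRuns_cons, hr3] at hr
                    simp [hec] at hr
                    omega
                rw [twoSame2Loop, if_pos ⟨hseen, rfl⟩, if_neg hhead,
                    hr2, altLoop_hit c (k + 1) t' seen hseen (by omega)]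
          · -- c ≠ d: run of c has length 1, both sides add c and move on
            obtain ⟨k, t', hr, _, _⟩ := pvRuns_shape d t
            have hr2 : pvRuns (c :: d :: t) = (c, 1) :: (d, k) :: t' := by
              rw [pvRuns_cons, hr]; simp [hcd]
            rw [twoSame2Loop, if_neg (by simp [hcd]), ih, hr,
                hr2, altLoop_miss c 1 ((d, k) :: t') seen (by omega)]

-- ===== VERDICT (by name: the statement is the Claim_ definition above) =====
theorem two_same2_spec : Claim_equal_two_same2 := by
  intro p _
  unfold Spec_two_same2 two_same2 two_same2_alt
  exact loops_agree p.toList PySem.Set.empty
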